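-- pv_equiv track=rewrite | github.com/eng-accelerator/Submissions_C2 | Group8/BrowserTesting/agents/adaptive_repair.py | _fix_products_wait
-- ===== SOURCE A (Python) =====
-- from typing import Tuple, List
--
-- def _find_body_region(lines: List[str]) -> Tuple[int, int]:
--     """
--     Find indices (start, end) of the body inside the try: block.
--
--     start = first line AFTER the 'try:' line
--     end   = line index of 'except ' that closes the try
--
--     Returns (-1, -1) if structure not found.
--     """
--     try_idx = -1
--     except_idx = -1
--
--     for i, line in enumerate(lines):
--         if "try:" in line and "page" in line:
--             try_idx = i
--             break
--
--     if try_idx == -1: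
--         return -1, -1
--
--     for i in range(try_idx + 1, len(lines)):
--         if line_startswith(lines[i], "except "):
--             except_idx = i
--             break
--
--     if except_idx == -1:
--         return -1, -1
--
--     return try_idx + 1, except_idx
--
-- def line_startswith(line: str, prefix: str) -> bool:
--     return line.lstrip().startswith(prefix)
--
-- def _get_body(script: str) -> Tuple[List[str], int, int]:
--     lines = script.splitlines()
--     start, end = _find_body_region(lines)
--     return lines, start, end
--
-- def _fix_products_wait(script: str, logs: str) -> Tuple[str, str, bool]:
--     """
--     If failure suggests waiting for Products page, ensure we wait for '.inventory_list'.
--     """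
--     if "Products" not in logs and "inventory_item" not in logs:
--         return script, "", False
--
--     if ".inventory_list" in script:
--         return script, "", False
--
--     lines, start, end = _get_body(script)
--     if start == -1:
--         return script, "", False
--
--     new_body_lines: List[str] = []
--     inserted = False
--     changed = False
--
--     for i in range(start, end):
--         line = lines[i]
--         new_body_lines.append(line)
--
--         if (
--             not inserted
--             and "page.goto" in line
--         ):
--             new_body_lines.append(" " * 12 + "page.wait_for_selector('.inventory_list', timeout=8000)")
--             inserted = True
--             changed = True
--
--     if not changed:
--         return script, "", False
--
--     new_script = "\n".join(lines[:start] + new_body_lines + lines[end:])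
--     note = "Added wait_for_selector('.inventory_list') to stabilize Products page load."
--     return new_script, note, True
-- ===== SOURCE B (Python) =====
-- def _fix_products_wait(script: str, logs: str):
--     """Single-pass state machine over the lines; returns the original script on every no-op path."""
--     if "Products" not in logs and "inventory_item" not in logs:
--         return script, "", False
--     if ".inventory_list" in script:
--         return script, "", False
--     out = []
--     state = 0  # 0 = before the qualifying try:, 1 = inside its body, 2 = at/after the closing except
--     inserted = False
--     for line in script.splitlines():
--         if state == 0 and "try:" in line and "page" in line:
--             state = 1
--         elif state == 1 and line.lstrip().startswith("except "):
--             state = 2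
--         elif state == 1 and not inserted and "page.goto" in line:
--             out.append(line)
--             out.append(" " * 12 + "page.wait_for_selector('.inventory_list', timeout=8000)")
--             inserted = True
--             continue
--         out.append(line)
--     if state != 2 or not inserted:
--         return script, "", False
--     return "\n".join(out), "Added wait_for_selector('.inventory_list') to stabilize Products page load.", True
-- ===== Notes on version B (the rewrite author's own statement) =====
-- stated objective: simpler
-- what changed: A's three sequential scans (find the try line, find the closing except by index range, then copy the body by index with slices and a join) are replaced by one state-machine pass over script.splitlines() that builds the output list and flags in a single traversal.
import Mathlib
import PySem

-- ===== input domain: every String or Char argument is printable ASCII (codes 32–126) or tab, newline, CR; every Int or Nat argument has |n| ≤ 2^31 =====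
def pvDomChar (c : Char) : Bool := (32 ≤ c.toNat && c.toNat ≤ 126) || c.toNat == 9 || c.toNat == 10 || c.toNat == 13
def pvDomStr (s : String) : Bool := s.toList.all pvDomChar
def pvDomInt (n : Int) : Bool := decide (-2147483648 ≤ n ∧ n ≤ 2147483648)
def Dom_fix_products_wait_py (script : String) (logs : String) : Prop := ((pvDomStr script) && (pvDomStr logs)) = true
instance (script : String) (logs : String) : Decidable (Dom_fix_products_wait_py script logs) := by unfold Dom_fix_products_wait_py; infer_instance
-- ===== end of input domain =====

-- B replaces A's three sequential scans (find try, find except, copy body by index) with one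
-- state-machine pass over the lines; same return value, including the original script on no-op paths.

def pvWaitLine : String := "            page.wait_for_selector('.inventory_list', timeout=8000)"
def pvNote : String := "Added wait_for_selector('.inventory_list') to stabilize Products page load."

-- ===== PORT A =====
def line_startswith_py (line : String) (pre : String) : Bool :=
  PySem.Str.startswith (PySem.Str.lstrip line) pre

-- first loop of _find_body_region (for i, line in enumerate(lines): … break)
def pvFindTryIdx : List (Int × String) → Int
  | [] => -1
  | (i, line) :: rest =>
    if PySem.Str.isIn "try:" line && PySem.Str.isIn "page" line then i else pvFindTryIdx rest

-- second loop of _find_body_region (for i in range(try_idx+1, len(lines)): … break)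
def pvFindExceptIdx (lines : List String) : List Int → Int
  | [] => -1
  | i :: rest =>
    if line_startswith_py (PySem.List.pyGetD lines i "") "except " then i
    else pvFindExceptIdx lines rest

def pvFindBodyRegion (lines : List String) : Int × Int :=
  let try_idx := pvFindTryIdx (PySem.List.enumerate lines)
  if try_idx == -1 then (-1, -1)
  else
    let except_idx := pvFindExceptIdx lines (PySem.List.pyRange (try_idx + 1) (PySem.List.len lines))
    if except_idx == -1 then (-1, -1)
    else (try_idx + 1, except_idx)

def pvGetBody (script : String) : List String × Int × Int :=
  let lines := PySem.Str.splitlines script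
  let r := pvFindBodyRegion lines
  (lines, r.1, r.2)

-- one iteration of A's body loop: (new_body_lines, inserted, changed), line = lines[i]
def pvAStep (lines : List String) (acc : List String × Bool × Bool) (i : Int) :
    List String × Bool × Bool :=
  let line := PySem.List.pyGetD lines i ""
  let nb := acc.1 ++ [line]
  if !acc.2.1 && PySem.Str.isIn "page.goto" line then (nb ++ [pvWaitLine], true, true)
  else (nb, acc.2.1, acc.2.2)

def fix_products_wait_py (script : String) (logs : String) : String × String × Bool :=
  if !PySem.Str.isIn "Products" logs && !PySem.Str.isIn "inventory_item" logs then (script, "", false)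
  else if PySem.Str.isIn ".inventory_list" script then (script, "", false)
  else
    let lse := pvGetBody script
    let lines := lse.1
    let start := lse.2.1
    let end_ := lse.2.2
    if start == -1 then (script, "", false)
    else
      let r := (PySem.List.pyRange start end_).foldl (pvAStep lines) ([], false, false)
      if !r.2.2 then (script, "", false)
      else
        (PySem.Str.join "\n"
          (PySem.List.slice lines none (some start) ++ r.1 ++ PySem.List.slice lines (some end_) none),
         pvNote, true)

-- ===== PORT B =====
-- one iteration of B's single pass: (out, state, inserted)
def pvBStep (acc : List String × Nat × Bool) (line : String) : List String × Nat × Bool :=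
  if acc.2.1 == 0 && (PySem.Str.isIn "try:" line && PySem.Str.isIn "page" line) then
    (acc.1 ++ [line], 1, acc.2.2)
  else if acc.2.1 == 1 && PySem.Str.startswith (PySem.Str.lstrip line) "except " then
    (acc.1 ++ [line], 2, acc.2.2)
  else if acc.2.1 == 1 && (!acc.2.2 && PySem.Str.isIn "page.goto" line) then
    (acc.1 ++ [line, pvWaitLine], 1, true)
  else (acc.1 ++ [line], acc.2.1, acc.2.2)

def fix_products_wait_py_alt (script : String) (logs : String) : String × String × Bool :=
  if !PySem.Str.isIn "Products" logs && !PySem.Str.isIn "inventory_item" logs then (script, "", false)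
  else if PySem.Str.isIn ".inventory_list" script then (script, "", false)
  else
    let r := (PySem.Str.splitlines script).foldl pvBStep ([], 0, false)
    if r.2.1 != 2 || !r.2.2 then (script, "", false)
    else (PySem.Str.join "\n" r.1, pvNote, true)

-- ===== PRECONDITION & SPEC =====
def Spec_fix_products_wait_py (script : String) (logs : String) (out : String × String × Bool) : Prop := out = fix_products_wait_py_alt script logs
instance (script : String) (logs : String) (out : String × String × Bool) : Decidable (Spec_fix_products_wait_py script logs out) := by unfold Spec_fix_products_wait_py; infer_instance

-- ===== CLAIM (what is proved, stated in full; the proofs are below) =====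
def Claim_equal_fix_products_wait_py : Prop := ∀ (script : String) (logs : String), Dom_fix_products_wait_py script logs → Spec_fix_products_wait_py script logs (fix_products_wait_py script logs)

-- ===== LEMMAS AND PROOFS =====
-- proof-side abbreviations for the two line tests
def isTryL (l : String) : Bool := PySem.Str.isIn "try:" l && PySem.Str.isIn "page" l
def isExcL (l : String) : Bool := PySem.Str.startswith (PySem.Str.lstrip l) "except "

-- A's body-loop step as a function of the line itself
def aStepE (acc : List String × Bool × Bool) (line : String) : List String × Bool × Bool :=
  let nb := acc.1 ++ [line]
  if !acc.2.1 && PySem.Str.isIn "page.goto" line then (nb ++ [pvWaitLine], true, true)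
  else (nb, acc.2.1, acc.2.2)

lemma pvAStep_eq (lines : List String) (acc : List String × Bool × Bool) (i : Int) :
    pvAStep lines acc i = aStepE acc (PySem.List.pyGetD lines i "") := rfl

lemma tryIdx_none (lines : List String) (s : Int)
    (h : ∀ l ∈ lines, isTryL l = false) :
    pvFindTryIdx (PySem.List.enumerate lines s) = -1 := by
  induction lines generalizing s with
  | nil => rfl
  | cons x xs ih =>
    rw [PySem.List.enumerate_cons]
    simp only [pvFindTryIdx]
    rw [show (PySem.Str.isIn "try:" x && PySem.Str.isIn "page" x) = false from h x (by simp)]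
    simp only [Bool.false_eq_true, if_false]
    exact ih (s + 1) (fun l hl => h l (by simp [hl]))

lemma tryIdx_found (pre : List String) (t : String) (rest : List String) (s : Int)
    (hpre : ∀ l ∈ pre, isTryL l = false) (ht : isTryL t = true) :
    pvFindTryIdx (PySem.List.enumerate (pre ++ t :: rest) s) = s + pre.length := by
  induction pre generalizing s with
  | nil =>
    rw [List.nil_append, PySem.List.enumerate_cons]
    simp only [pvFindTryIdx]
    rw [show (PySem.Str.isIn "try:" t && PySem.Str.isIn "page" t) = true from ht]
    simp
  | cons x xs ih =>
    rw [List.cons_append, PySem.List.enumerate_cons]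
    simp only [pvFindTryIdx]
    rw [show (PySem.Str.isIn "try:" x && PySem.Str.isIn "page" x) = false from hpre x (by simp)]
    simp only [Bool.false_eq_true, if_false]
    rw [ih (s + 1) (fun l hl => hpre l (by simp [hl]))]
    simp only [List.length_cons]
    push_cast
    ring

lemma exceptIdx_none (lines : List String) (k : Nat)
    (h : ∀ l ∈ lines.drop k, isExcL l = false) :
    pvFindExceptIdx lines (PySem.List.pyRange (k : Int) (PySem.List.len lines)) = -1 := by
  induction hn : lines.length - k generalizing k with
  | zero =>
    rw [PySem.List.pyRange_one_eq_nil (by show (lines.length : Int) ≤ _; omega)]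
    rfl
  | succ n ih =>
    have hk : k < lines.length := by omega
    rw [PySem.List.pyRange_one_cons (by show (k : Int) < (lines.length : Int); omega)]
    simp only [pvFindExceptIdx]
    have hval : PySem.List.pyGetD lines (k : Int) "" = lines[k] := by
      rw [PySem.List.pyGetD_natCast]; exact List.getD_eq_getElem lines "" hk
    have hmem : lines[k] ∈ lines.drop k := by
      rw [List.drop_eq_getElem_cons hk]; exact List.mem_cons_self
    rw [show line_startswith_py (PySem.List.pyGetD lines (k : Int) "") "except " = false from by
      rw [hval]; exact h _ hmem]
    simp only [Bool.false_eq_true, if_false]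
    rw [show (k : Int) + 1 = ((k + 1 : Nat) : Int) by push_cast; ring]
    exact ih (k + 1) (fun l hl => h l (by
      rw [List.drop_eq_getElem_cons hk]; exact List.mem_cons_of_mem _ hl)) (by omega)

lemma exceptIdx_found (lines : List String) (k e : Nat) (hk : k ≤ e) (he : e < lines.length)
    (hclean : ∀ l ∈ (lines.drop k).take (e - k), isExcL l = false)
    (hexc : isExcL (lines.getD e "") = true) :
    pvFindExceptIdx lines (PySem.List.pyRange (k : Int) (PySem.List.len lines)) = (e : Int) := by
  induction hn : e - k generalizing k with
  | zero =>
    have hke : k = e := by omega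
    subst hke
    rw [PySem.List.pyRange_one_cons (by show (k : Int) < (lines.length : Int); omega)]
    simp only [pvFindExceptIdx]
    rw [show line_startswith_py (PySem.List.pyGetD lines (k : Int) "") "except " = true from by
      rw [PySem.List.pyGetD_natCast]; exact hexc]
    simp
  | succ n ih =>
    have hk' : k < lines.length := by omega
    rw [PySem.List.pyRange_one_cons (by show (k : Int) < (lines.length : Int); omega)]
    simp only [pvFindExceptIdx]
    have hval : PySem.List.pyGetD lines (k : Int) "" = lines[k] := by
      rw [PySem.List.pyGetD_natCast]; exact List.getD_eq_getElem lines "" hk'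
    have hmem : lines[k] ∈ (lines.drop k).take (e - k) := by
      rw [List.drop_eq_getElem_cons hk', show e - k = (e - (k+1)) + 1 by omega]
      exact List.mem_cons_self
    rw [show line_startswith_py (PySem.List.pyGetD lines (k : Int) "") "except " = false from by
      rw [hval]; exact hclean _ hmem]
    simp only [Bool.false_eq_true, if_false]
    rw [show (k : Int) + 1 = ((k + 1 : Nat) : Int) by push_cast; ring]
    exact ih (k + 1) (by omega) (fun l hl => hclean l (by
      rw [List.drop_eq_getElem_cons hk', show e - k = (e - (k+1)) + 1 by omega]
      exact List.mem_cons_of_mem _ hl)) (by omega)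

lemma foldl_range_A (lines : List String) (init : List String × Bool × Bool)
    (a b : Nat) (hb : b ≤ lines.length) :
    (PySem.List.pyRange (a : Int) (b : Int)).foldl (pvAStep lines) init
      = ((lines.drop a).take (b - a)).foldl aStepE init := by
  induction hn : b - a generalizing a init with
  | zero =>
    rw [PySem.List.pyRange_one_eq_nil (by show (b : Int) ≤ (a : Int); omega)]
    simp
  | succ n ih =>
    have ha : a < lines.length := by omega
    rw [PySem.List.pyRange_one_cons (by show (a : Int) < (b : Int); omega),
        List.drop_eq_getElem_cons ha]
    simp only [List.take_succ_cons, List.foldl_cons]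
    rw [show (a : Int) + 1 = ((a + 1 : Nat) : Int) by push_cast; ring]
    rw [ih (pvAStep lines init (a : Int)) (a + 1) (by omega)]
    congr 1
    rw [pvAStep_eq, PySem.List.pyGetD_natCast, List.getD_eq_getElem lines "" ha]

-- B's pass stays in state 0 over lines without a qualifying try
lemma state0_clean (seg : List String) (out : List String) (ins : Bool)
    (h : ∀ l ∈ seg, isTryL l = false) :
    seg.foldl pvBStep (out, 0, ins) = (out ++ seg, 0, ins) := by
  induction seg generalizing out with
  | nil => simp
  | cons x xs ih =>
    simp only [List.foldl_cons]
    rw [show pvBStep (out, 0, ins) x = (out ++ [x], 0, ins) from by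
      simp only [pvBStep]
      rw [show (PySem.Str.isIn "try:" x && PySem.Str.isIn "page" x) = false from h x (by simp)]
      simp]
    rw [ih (out ++ [x]) (fun l hl => h l (by simp [hl]))]
    simp

-- B's pass in state 1 over lines without an except is A's body loop
lemma state1_fold (seg : List String) (out nb : List String) (ins ch : Bool)
    (h : ∀ l ∈ seg, isExcL l = false) :
    seg.foldl pvBStep (out ++ nb, 1, ins)
      = (out ++ (seg.foldl aStepE (nb, ins, ch)).1, 1, (seg.foldl aStepE (nb, ins, ch)).2.1) := by
  induction seg generalizing nb ins ch with
  | nil => simp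
  | cons x xs ih =>
    have hx : PySem.Str.startswith (PySem.Str.lstrip x) "except " = false := h x (by simp)
    have hrest : ∀ l ∈ xs, isExcL l = false := fun l hl => h l (by simp [hl])
    simp only [List.foldl_cons]
    by_cases hg : (!ins && PySem.Str.isIn "page.goto" x) = true
    · rw [show pvBStep (out ++ nb, 1, ins) x = (out ++ (nb ++ [x, pvWaitLine]), 1, true) from by
        simp only [pvBStep, show ((1 : Nat) == 0) = false from rfl,
          show ((1 : Nat) == 1) = true from rfl, Bool.false_and, Bool.true_and, hx,
          Bool.false_eq_true, if_false, hg, if_true, List.append_assoc]]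
      rw [show aStepE (nb, ins, ch) x = (nb ++ [x, pvWaitLine], true, true) from by
        simp only [aStepE, hg, if_true, List.append_assoc]; rfl]
      rw [ih (nb ++ [x, pvWaitLine]) true true hrest]
    · rw [Bool.not_eq_true] at hg
      rw [show pvBStep (out ++ nb, 1, ins) x = (out ++ (nb ++ [x]), 1, ins) from by
        simp only [pvBStep, show ((1 : Nat) == 0) = false from rfl,
          show ((1 : Nat) == 1) = true from rfl, Bool.false_and, Bool.true_and, hx,
          Bool.false_eq_true, if_false, hg, List.append_assoc]]
      rw [show aStepE (nb, ins, ch) x = (nb ++ [x], ins, ch) from by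
        simp only [aStepE, hg, Bool.false_eq_true, if_false]]
      exact ih (nb ++ [x]) ins ch hrest

-- B's pass in state 2 copies the rest
lemma state2_copy (seg : List String) (out : List String) (ins : Bool) :
    seg.foldl pvBStep (out, 2, ins) = (out ++ seg, 2, ins) := by
  induction seg generalizing out with
  | nil => simp
  | cons x xs ih =>
    simp only [List.foldl_cons]
    rw [show pvBStep (out, 2, ins) x = (out ++ [x], 2, ins) from by simp [pvBStep]]
    rw [ih (out ++ [x])]
    simp

-- in A's body loop, changed stays equal to inserted
lemma aFold_inv (seg : List String) (nb : List String) (b : Bool) :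
    ((seg.foldl aStepE (nb, b, b)).2.2 = (seg.foldl aStepE (nb, b, b)).2.1) := by
  induction seg generalizing nb b with
  | nil => rfl
  | cons x xs ih =>
    simp only [List.foldl_cons, aStepE]
    by_cases hg : (!b && PySem.Str.isIn "page.goto" x) = true
    · simp only [hg, if_true]; exact ih _ true
    · simp only [hg, Bool.false_eq_true, if_false]; exact ih _ b

lemma core (script : String) (lines : List String) :
    (let start := (pvFindBodyRegion lines).1
     let end_ := (pvFindBodyRegion lines).2
     if start == -1 then (script, "", false)
     else
       let r := (PySem.List.pyRange start end_).foldl (pvAStep lines) ([], false, false)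
       if !r.2.2 then (script, "", false)
       else
         (PySem.Str.join "\n"
           (PySem.List.slice lines none (some start) ++ r.1 ++ PySem.List.slice lines (some end_) none),
          pvNote, true))
    = (let r := lines.foldl pvBStep ([], 0, false)
       if r.2.1 != 2 || !r.2.2 then (script, "", false)
       else (PySem.Str.join "\n" r.1, pvNote, true)) := by
  by_cases hT : ∀ l ∈ lines, isTryL l = false
  · have h1 : pvFindTryIdx (PySem.List.enumerate lines) = -1 := tryIdx_none lines 0 hT
    have h2 : lines.foldl pvBStep ([], 0, false) = ([] ++ lines, 0, false) :=
      state0_clean lines [] false hT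
    simp [h1, h2, pvFindBodyRegion]
  · -- a qualifying try line exists: split lines = pre ++ t :: rest'
    have hdw : lines.dropWhile (fun l => !isTryL l) ≠ [] := by
      rw [Ne, List.dropWhile_eq_nil_iff]
      intro hall
      apply hT
      intro l hl
      have := hall l hl
      simpa using this
    obtain ⟨t, rest', hd⟩ := List.exists_cons_of_ne_nil hdw
    have hlines : lines = lines.takeWhile (fun l => !isTryL l) ++ t :: rest' := by
      conv_lhs => rw [← List.takeWhile_append_dropWhile (p := fun l => !isTryL l) (l := lines)]
      rw [hd]
    set pre := lines.takeWhile (fun l => !isTryL l) with hpre_def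
    have hpre : ∀ l ∈ pre, isTryL l = false := by
      intro l hl
      have := List.mem_takeWhile_imp hl
      simpa using this
    have ht : isTryL t = true := by
      have h' := List.head_dropWhile_not (fun l => !isTryL l) hdw
      simp only [hd, List.head_cons] at h'
      simpa using h'
    have htry : pvFindTryIdx (PySem.List.enumerate lines) = (pre.length : Int) := by
      conv_lhs => rw [hlines]
      simpa using tryIdx_found pre t rest' 0 hpre ht
    have hstept : pvBStep (pre, 0, false) t = (pre ++ [t], 1, false) := by
      simp only [pvBStep, show ((0 : Nat) == 0) = true from rfl, Bool.true_and]
      rw [show (PySem.Str.isIn "try:" t && PySem.Str.isIn "page" t) = true from ht]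
      simp
    have hcast : ((pre.length : Int) + 1) = ((pre.length + 1 : Nat) : Int) := by push_cast; ring
    have hne1 : (((pre.length : Int)) == -1) = false := by
      rw [beq_eq_false_iff_ne]; omega
    have hdropPre : lines.drop (pre.length + 1) = rest' := by
      conv_lhs => rw [hlines, show pre ++ t :: rest' = (pre ++ [t]) ++ rest' by simp]
      exact List.drop_left' (by simp)
    by_cases hE : ∀ l ∈ rest', isExcL l = false
    · -- no closing except: both sides are the no-op value
      have hexc : pvFindExceptIdx lines
          (PySem.List.pyRange ((pre.length : Int) + 1) (PySem.List.len lines)) = -1 := by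
        rw [hcast]
        exact exceptIdx_none lines (pre.length + 1) (by rw [hdropPre]; exact hE)
      have hregion : pvFindBodyRegion lines = (-1, -1) := by
        simp only [pvFindBodyRegion, htry, hne1, Bool.false_eq_true, if_false, hexc]
        simp
      have hb1 := state1_fold rest' (pre ++ [t]) [] false false hE
      rw [List.append_nil] at hb1
      have hBfold : lines.foldl pvBStep ([], 0, false) =
          (pre ++ [t] ++ (rest'.foldl aStepE ([], false, false)).1, 1,
           (rest'.foldl aStepE ([], false, false)).2.1) := by
        conv_lhs => rw [hlines]
        rw [List.foldl_append]
        rw [show pre.foldl pvBStep ([], 0, false) = (pre, 0, false) from by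
              simpa using state0_clean pre [] false hpre]
        rw [List.foldl_cons, hstept, hb1]
      simp [hregion, hBfold]
    · -- a closing except exists: split rest' = body ++ exc :: tail
      have hdwq : rest'.dropWhile (fun l => !isExcL l) ≠ [] := by
        rw [Ne, List.dropWhile_eq_nil_iff]
        intro hall
        apply hE
        intro l hl
        have := hall l hl
        simpa using this
      obtain ⟨exc, tail, hdq⟩ := List.exists_cons_of_ne_nil hdwq
      have hrest : rest' = rest'.takeWhile (fun l => !isExcL l) ++ exc :: tail := by
        conv_lhs => rw [← List.takeWhile_append_dropWhile (p := fun l => !isExcL l) (l := rest')]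
        rw [hdq]
      set body := rest'.takeWhile (fun l => !isExcL l) with hbody_def
      have hbody : ∀ l ∈ body, isExcL l = false := by
        intro l hl
        have := List.mem_takeWhile_imp hl
        simpa using this
      have hexcT : isExcL exc = true := by
        have h' := List.head_dropWhile_not (fun l => !isExcL l) hdwq
        simp only [hdq, List.head_cons] at h'
        simpa using h'
      have hlines2 : lines = (pre ++ t :: body) ++ exc :: tail := by
        rw [hlines, hrest]; simp
      have hlen2 : (pre ++ t :: body).length = pre.length + 1 + body.length := by
        simp; omega
      have he_lt : pre.length + 1 + body.length < lines.length := by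
        rw [hlines2]; simp; omega
      have hdropE : lines.drop (pre.length + 1 + body.length) = exc :: tail := by
        conv_lhs => rw [hlines2]
        exact List.drop_left' hlen2
      have htake_body : (lines.drop (pre.length + 1)).take
          ((pre.length + 1 + body.length) - (pre.length + 1)) = body := by
        rw [hdropPre, show (pre.length + 1 + body.length) - (pre.length + 1) = body.length by omega]
        conv_lhs => rw [hrest]
        exact List.take_left' rfl
      have hgetD_e : lines.getD (pre.length + 1 + body.length) "" = exc := by
        have hopt : lines[pre.length + 1 + body.length]? = some exc := by
          rw [← List.head?_drop, hdropE]; rfl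
        rw [List.getD_eq_getElem?_getD, hopt]; rfl
      have hcast2 : ((pre.length + 1 + body.length : Nat) : Int) = (pre.length : Int) + 1 + (body.length : Int) := by
        push_cast; ring
      have hexcIdx : pvFindExceptIdx lines
          (PySem.List.pyRange ((pre.length : Int) + 1) (PySem.List.len lines)) =
          ((pre.length + 1 + body.length : Nat) : Int) := by
        rw [hcast]
        exact exceptIdx_found lines (pre.length + 1) (pre.length + 1 + body.length)
          (by omega) he_lt (by rw [htake_body]; exact hbody) (by rw [hgetD_e]; exact hexcT)
      have hne2 : ((((pre.length + 1 + body.length : Nat) : Int)) == -1) = false := by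
        rw [beq_eq_false_iff_ne]; omega
      have hregion : pvFindBodyRegion lines =
          ((pre.length : Int) + 1, ((pre.length + 1 + body.length : Nat) : Int)) := by
        simp only [pvFindBodyRegion, htry, hne1, Bool.false_eq_true, if_false, hexcIdx, hne2]
      have hAfold : (PySem.List.pyRange ((pre.length : Int) + 1)
            ((pre.length + 1 + body.length : Nat) : Int)).foldl (pvAStep lines) ([], false, false)
          = body.foldl aStepE ([], false, false) := by
        rw [hcast, foldl_range_A lines ([], false, false) (pre.length + 1)
              (pre.length + 1 + body.length) (le_of_lt he_lt), htake_body]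
      have hch : (body.foldl aStepE ([], false, false)).2.2
          = (body.foldl aStepE ([], false, false)).2.1 := aFold_inv body [] false
      have hb1 := state1_fold body (pre ++ [t]) [] false false hbody
      rw [List.append_nil] at hb1
      have hstepexc : pvBStep (pre ++ [t] ++ (body.foldl aStepE ([], false, false)).1, 1,
            (body.foldl aStepE ([], false, false)).2.1) exc
          = (pre ++ [t] ++ (body.foldl aStepE ([], false, false)).1 ++ [exc], 2,
             (body.foldl aStepE ([], false, false)).2.1) := by
        simp only [pvBStep, show ((1 : Nat) == 0) = false from rfl,
          show ((1 : Nat) == 1) = true from rfl, Bool.false_and, Bool.true_and,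
          Bool.false_eq_true, if_false,
          show PySem.Str.startswith (PySem.Str.lstrip exc) "except " = true from hexcT, if_true]
      have hBfold : lines.foldl pvBStep ([], 0, false) =
          (pre ++ [t] ++ (body.foldl aStepE ([], false, false)).1 ++ [exc] ++ tail, 2,
           (body.foldl aStepE ([], false, false)).2.1) := by
        conv_lhs => rw [hlines, hrest]
        rw [List.foldl_append]
        rw [show pre.foldl pvBStep ([], 0, false) = (pre, 0, false) from by
              simpa using state0_clean pre [] false hpre]
        rw [List.foldl_cons, hstept, List.foldl_append, hb1, List.foldl_cons, hstepexc,
            state2_copy]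
      have hslice1 : PySem.List.slice lines none (some ((pre.length : Int) + 1)) = pre ++ [t] := by
        rw [hcast, PySem.List.slice_to_natCast]
        conv_lhs => rw [hlines, show pre ++ t :: rest' = (pre ++ [t]) ++ rest' by simp]
        exact List.take_left' (by simp)
      have hslice2 : PySem.List.slice lines
          (some ((pre.length + 1 + body.length : Nat) : Int)) none = exc :: tail := by
        rw [PySem.List.slice_from_natCast]
        exact hdropE
      simp only [hregion, hBfold, hAfold, hslice1, hslice2]
      by_cases hins : (body.foldl aStepE ([], false, false)).2.1 = true
      · simp only [hins, hch ▸ hins]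
        simp only [show (((pre.length : Int) + 1) == -1) = false from by
          rw [beq_eq_false_iff_ne]; omega]
        simp
      · rw [Bool.not_eq_true] at hins
        simp only [hins, hch ▸ hins]
        simp only [show (((pre.length : Int) + 1) == -1) = false from by
          rw [beq_eq_false_iff_ne]; omega]
        simp

-- ===== VERDICT (by name: the statement is the Claim_ definition above) =====
set_option maxHeartbeats 1000000 in
theorem fix_products_wait_py_spec : Claim_equal_fix_products_wait_py := by
  intro script logs _
  unfold Spec_fix_products_wait_py
  show fix_products_wait_py script logs = fix_products_wait_py_alt script logs
  dsimp only [fix_products_wait_py, fix_products_wait_py_alt, pvGetBody]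
  by_cases h1 : (!PySem.Str.isIn "Products" logs && !PySem.Str.isIn "inventory_item" logs) = true
  · rw [if_pos h1, if_pos h1]
  · rw [if_neg h1, if_neg h1]
    by_cases h2 : PySem.Str.isIn ".inventory_list" script = true
    · rw [if_pos h2, if_pos h2]
    · rw [if_neg h2, if_neg h2]
      exact core script (PySem.Str.splitlines script)
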